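-- pv_equiv track=rewrite | github.com/DataDog/nginx-datadog | bin/generate_gitlab_ci.py | split_test_nginx_all
-- ===== SOURCE A (Python) =====
-- NGINX_TEST_JOBS_PER_VERSION = 8
--
-- EXTRA_TEST_JOBS_PER_IMAGE = 4
--
-- GITLAB_MATRIX_LIMIT = 200
--
-- def split_test_nginx_all(all_versions, extras):
--     """Split nginx versions across test-nginx-all / test-nginx-all-bis to stay
--     under the GitLab 200-job matrix limit.
--
--     Returns (first_versions, first_extras, second_versions, second_extras).
--     """
--     total_jobs = 0
--     first_versions = []
--     for v in all_versions:
--         total_jobs += NGINX_TEST_JOBS_PER_VERSION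
--         if total_jobs > GITLAB_MATRIX_LIMIT:
--             break
--         first_versions.append(v)
--
--     second_versions = all_versions[len(first_versions):]
--
--     # Try to fit extras in the first batch
--     extra_jobs = len(extras) * EXTRA_TEST_JOBS_PER_IMAGE
--     if total_jobs + extra_jobs <= GITLAB_MATRIX_LIMIT:
--         first_extras = extras
--         second_extras = []
--     else:
--         first_extras = []
--         second_extras = extras
--
--     return first_versions, first_extras, second_versions, second_extras
-- ===== SOURCE B (Python) =====
-- NGINX_TEST_JOBS_PER_VERSION = 8
--
-- EXTRA_TEST_JOBS_PER_IMAGE = 4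
--
-- GITLAB_MATRIX_LIMIT = 200
--
-- def split_test_nginx_all(all_versions, extras):
--     """Closed-form split: the first batch is simply the first
--     GITLAB_MATRIX_LIMIT // NGINX_TEST_JOBS_PER_VERSION versions, and extras fit
--     in the first batch iff all versions plus all extras fit under the limit."""
--     k = GITLAB_MATRIX_LIMIT // NGINX_TEST_JOBS_PER_VERSION
--     first_versions = all_versions[:k]
--     second_versions = all_versions[k:]
--     if (len(all_versions) * NGINX_TEST_JOBS_PER_VERSION
--             + len(extras) * EXTRA_TEST_JOBS_PER_IMAGE) <= GITLAB_MATRIX_LIMIT: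
--         return first_versions, extras, second_versions, []
--     return first_versions, [], second_versions, extras
-- ===== Notes on version B (the rewrite author's own statement) =====
-- stated objective: simpler
-- what changed: Replaced the counting loop and break with closed-form slices at k = GITLAB_MATRIX_LIMIT // NGINX_TEST_JOBS_PER_VERSION and a single arithmetic test deciding where the extras go.
import Mathlib
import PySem

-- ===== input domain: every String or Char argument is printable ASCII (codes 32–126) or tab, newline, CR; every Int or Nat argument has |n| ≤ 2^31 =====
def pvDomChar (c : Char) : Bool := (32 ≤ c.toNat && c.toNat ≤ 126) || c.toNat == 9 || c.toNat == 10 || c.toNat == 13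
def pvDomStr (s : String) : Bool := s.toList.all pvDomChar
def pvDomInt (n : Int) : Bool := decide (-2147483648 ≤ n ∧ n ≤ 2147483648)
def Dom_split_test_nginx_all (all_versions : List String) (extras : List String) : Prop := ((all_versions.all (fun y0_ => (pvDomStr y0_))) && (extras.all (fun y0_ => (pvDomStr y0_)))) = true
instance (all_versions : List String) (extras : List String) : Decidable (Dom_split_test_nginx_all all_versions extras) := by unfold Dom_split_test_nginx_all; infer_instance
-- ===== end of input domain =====

-- B replaces A's counting loop with closed-form slices at k = 200 // 8 and one arithmetic test (objective: simpler).

-- ===== PORT A =====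
-- A's for-loop with break: state (total_jobs, first_versions), stop when total exceeds the limit.
def splitA_loop : List String → Int → List String → Int × List String
  | [], total, acc => (total, acc)
  | v :: rest, total, acc =>
    let total' := total + 8
    if total' > 200 then (total', acc)
    else splitA_loop rest total' (acc ++ [v])

def split_test_nginx_all (all_versions : List String) (extras : List String) : List String × List String × List String × List String :=
  let r := splitA_loop all_versions 0 []
  let total_jobs := r.1
  let first_versions := r.2
  let second_versions := PySem.List.slice all_versions (some (first_versions.length : Int)) none
  let extra_jobs : Int := (extras.length : Int) * 4
  if total_jobs + extra_jobs ≤ 200 then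
    (first_versions, extras, second_versions, [])
  else
    (first_versions, [], second_versions, extras)

-- ===== PORT B =====
def split_test_nginx_all_alt (all_versions : List String) (extras : List String) : List String × List String × List String × List String :=
  let k : Int := PySem.Int.floordiv 200 8
  let first_versions := PySem.List.slice all_versions none (some k)
  let second_versions := PySem.List.slice all_versions (some k) none
  if (all_versions.length : Int) * 8 + (extras.length : Int) * 4 ≤ 200 then
    (first_versions, extras, second_versions, [])
  else
    (first_versions, [], second_versions, extras)

-- ===== PRECONDITION & SPEC =====
def Spec_split_test_nginx_all (all_versions : List String) (extras : List String) (out : List String × List String × List String × List String) : Prop := out = split_test_nginx_all_alt all_versions extras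
instance (all_versions : List String) (extras : List String) (out : List String × List String × List String × List String) : Decidable (Spec_split_test_nginx_all all_versions extras out) := by unfold Spec_split_test_nginx_all; infer_instance

-- ===== CLAIM (what is proved, stated in full; the proofs are below) =====
def Claim_equal_split_test_nginx_all : Prop := ∀ (all_versions : List String) (extras : List String), Dom_split_test_nginx_all all_versions extras → Spec_split_test_nginx_all all_versions extras (split_test_nginx_all all_versions extras)

-- ===== LEMMAS AND PROOFS =====

-- Characterisation of A's loop started at total = 8*i, i ≤ 25: it appends the whole
-- remainder if it fits under the limit, else the next 25 - i elements with total 208.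
theorem splitA_loop_char (l : List String) : ∀ (i : Nat) (acc : List String), i ≤ 25 →
    splitA_loop l (8 * (i : Int)) acc =
      if l.length + i ≤ 25 then ((8 * ((l.length + i : Nat) : Int)), acc ++ l)
      else (208, acc ++ l.take (25 - i)) := by
  induction l with
  | nil =>
    intro i acc hi
    simp [splitA_loop]
    omega
  | cons v rest ih =>
    intro i acc hi
    show (if 8 * (i : Int) + 8 > 200 then (8 * (i : Int) + 8, acc)
          else splitA_loop rest (8 * (i : Int) + 8) (acc ++ [v])) = _
    by_cases h25 : i = 25
    · subst h25
      have : ¬ (rest.length + 1 + 25 ≤ 25) := by omega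
      simp [this]
    · have hlt : i < 25 := by omega
      have hcond : ¬ (8 * (i : Int) + 8 > 200) := by
        omega
      rw [if_neg hcond]
      have h8 : 8 * (i : Int) + 8 = 8 * ((i + 1 : Nat) : Int) := by push_cast; ring
      rw [h8, ih (i + 1) (acc ++ [v]) (by omega)]
      by_cases hfit : rest.length + (i + 1) ≤ 25
      · rw [if_pos hfit, if_pos (show (v :: rest).length + i ≤ 25 by simp; omega)]
        simp [Prod.ext_iff]
        ring
      · rw [if_neg hfit, if_neg (show ¬ ((v :: rest).length + i ≤ 25) by simp; omega)]
        rw [show 25 - i = (25 - (i + 1)) + 1 from by omega, List.take_succ_cons]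
        simp

-- ===== VERDICT (by name: the statement is the Claim_ definition above) =====
theorem split_test_nginx_all_spec : Claim_equal_split_test_nginx_all := by
  intro all_versions extras _
  unfold Spec_split_test_nginx_all split_test_nginx_all split_test_nginx_all_alt
  have hloop := splitA_loop_char all_versions 0 [] (by omega)
  have h8 : (8 : Int) * ((0 : Nat) : Int) = 0 := by norm_num
  rw [h8] at hloop
  have hk : PySem.Int.floordiv 200 8 = 25 := by decide
  rw [hloop, hk]
  by_cases hfit : all_versions.length + 0 ≤ 25
  · have hlen : all_versions.length ≤ 25 := by omega
    simp only [hfit, if_true]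
    have htake : PySem.List.slice all_versions none (some (25 : Int)) = all_versions := by
      rw [show ((25 : Int)) = ((25 : Nat) : Int) by norm_num, PySem.List.slice_to_natCast]
      exact List.take_of_length_le hlen
    have hdropA : PySem.List.slice all_versions (some ((all_versions.length : Nat) : Int)) none = [] := by
      rw [PySem.List.slice_from_natCast]; simp
    have hdropB : PySem.List.slice all_versions (some (25 : Int)) none = [] := by
      rw [show ((25 : Int)) = ((25 : Nat) : Int) by norm_num, PySem.List.slice_from_natCast]
      exact List.drop_eq_nil_of_le hlen
    have hcond : (8 * ((all_versions.length + 0 : Nat) : Int) + (extras.length : Int) * 4 ≤ 200) ↔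
        ((all_versions.length : Int) * 8 + (extras.length : Int) * 4 ≤ 200) := by
      push_cast; constructor <;> intro <;> omega
    simp only [List.nil_append, hdropA, hdropB, htake]
    by_cases hc : (all_versions.length : Int) * 8 + (extras.length : Int) * 4 ≤ 200
    · rw [if_pos (hcond.mpr hc), if_pos hc]
    · rw [if_neg (fun h => hc (hcond.mp h)), if_neg hc]
  · have hlen : 25 < all_versions.length := by omega
    simp only [hfit, if_false]
    have hAcond : ¬ ((208 : Int) + (extras.length : Int) * 4 ≤ 200) := by
      have : (0 : Int) ≤ (extras.length : Int) := by positivity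
      omega
    have hBcond : ¬ ((all_versions.length : Int) * 8 + (extras.length : Int) * 4 ≤ 200) := by
      have h1 : (26 : Int) ≤ (all_versions.length : Int) := by exact_mod_cast hlen
      have : (0 : Int) ≤ (extras.length : Int) := by positivity
      nlinarith
    simp only [List.nil_append, hAcond, hBcond, if_false]
    have hlen25 : (all_versions.take (25 - 0)).length = 25 := by
      simp; omega
    rw [hlen25]
    have htake : PySem.List.slice all_versions none (some (25 : Int)) = all_versions.take 25 := by
      rw [show ((25 : Int)) = ((25 : Nat) : Int) by norm_num, PySem.List.slice_to_natCast]
    have hdrop : ∀ o, PySem.List.slice all_versions (some ((25 : Nat) : Int)) o = PySem.List.slice all_versions (some (25 : Int)) o := by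
      intro o; norm_num
    simp [htake]
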